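-- pv_equiv track=rewrite | github.com/Taoge123/OptimizedLeetcode | LeetcodeNew/files/test.py | cutBamboo
-- ===== SOURCE A (Python) =====
-- def cutBamboo(nums):
--     res = []
--     while len(nums) > 0:
--         mini = min(nums)
--         temp = [num - mini for num in nums]
--         temp = [num for num in temp if num > 0]
--         nums = temp
--         res.append(len(temp))
--
--     return res
-- ===== SOURCE B (Python) =====
-- def cutBamboo(nums):
--     # Sort once, then sweep: for each run of equal values append how many
--     # elements lie strictly above it (single pass over the sorted list).
--     s = sorted(nums)
--     n = len(s)
--     res = []
--     i = 0
--     while i < n: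
--         v = s[i]
--         while i < n and s[i] == v:
--             i += 1
--         res.append(n - i)
--     return res
-- ===== Notes on version B (the rewrite author's own statement) =====
-- stated objective: faster
-- what changed: Instead of repeatedly scanning for the minimum, subtracting it and rebuilding the list each round, B sorts once and sweeps the sorted list, emitting for each run of equal values the count of elements after it.
import Mathlib
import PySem

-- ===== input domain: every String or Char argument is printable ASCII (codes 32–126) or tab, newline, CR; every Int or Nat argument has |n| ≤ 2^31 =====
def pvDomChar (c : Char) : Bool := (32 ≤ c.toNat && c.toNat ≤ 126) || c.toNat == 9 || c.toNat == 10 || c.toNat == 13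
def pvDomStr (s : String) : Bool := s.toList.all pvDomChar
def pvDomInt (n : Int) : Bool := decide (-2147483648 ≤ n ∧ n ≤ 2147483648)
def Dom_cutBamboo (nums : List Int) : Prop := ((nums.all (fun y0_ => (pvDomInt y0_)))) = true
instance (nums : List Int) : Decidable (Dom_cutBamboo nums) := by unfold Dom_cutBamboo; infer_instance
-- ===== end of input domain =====

-- B replaces A's repeated min-scan/subtract/rebuild rounds by one sort followed by a
-- single sweep over the sorted list (objective: faster).

-- ===== PORT A =====
-- min(nums) with no key is the running-min fold (PySem.List.min?_id_cons)
def pyMin (x : Int) (t : List Int) : Int := t.foldl min x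

-- A: while nums: m = min(nums); temp = [x - m for x in nums]; temp = [x for x in temp if x > 0];
--    nums = temp; res.append(len(temp))
def cutBamboo (nums : List Int) : List Int :=
  match nums with
  | [] => []
  | x :: t =>
    let mini := pyMin x t
    let temp := ((x :: t).map (fun num => num - mini)).filter (fun num => decide (0 < num))
    (temp.length : Int) :: cutBamboo temp
termination_by nums.length
decreasing_by
  have hm : pyMin x t ∈ x :: t := by
    rcases PySem.List.foldl_min_mem t x with h | h
    · rw [show pyMin x t = x from h]; exact List.mem_cons_self
    · exact List.mem_cons_of_mem _ h
  calc (((x :: t).map (fun num => num - pyMin x t)).filter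
          (fun num => decide (0 < num))).length
      < ((x :: t).map (fun num => num - pyMin x t)).length := by
        rw [List.length_filter_lt_length_iff_exists]
        exact ⟨pyMin x t - pyMin x t, List.mem_map_of_mem hm, by simp⟩
    _ = (x :: t).length := List.length_map _
    _ = t.length + 1 := rfl

-- ===== PORT B =====
-- B: sweep the sorted list; for each run of equal values emit the count of what follows.
def scanRuns (s : List Int) : List Int :=
  match s with
  | [] => []
  | v :: rest =>
    let r := rest.dropWhile (fun y => y == v)   -- inner while: skip the run of v's
    (r.length : Int) :: scanRuns r              -- res.append(n - i)
termination_by s.length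
decreasing_by
  exact Nat.lt_succ_of_le (List.length_dropWhile_le _ _)

def cutBamboo_alt (nums : List Int) : List Int :=
  scanRuns (PySem.List.sorted nums (fun x => x) false)

-- ===== PRECONDITION & SPEC =====
def Spec_cutBamboo (nums : List Int) (out : List Int) : Prop := out = cutBamboo_alt nums
instance (nums : List Int) (out : List Int) : Decidable (Spec_cutBamboo nums out) := by unfold Spec_cutBamboo; infer_instance

-- ===== CLAIM (what is proved, stated in full; the proofs are below) =====
def Claim_equal_cutBamboo : Prop := ∀ (nums : List Int), Dom_cutBamboo nums → Spec_cutBamboo nums (cutBamboo nums)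

-- ===== LEMMAS AND PROOFS =====

theorem cutBamboo_nil : cutBamboo [] = [] := by rw [cutBamboo]

theorem scanRuns_nil : scanRuns [] = [] := by rw [scanRuns]

-- one-step unfolding of A's loop on a nonempty list
theorem cutBamboo_cons (x : Int) (t : List Int) :
    cutBamboo (x :: t) =
      ((((x :: t).map (fun num => num - pyMin x t)).filter
          (fun num => decide (0 < num))).length : Int) ::
        cutBamboo (((x :: t).map (fun num => num - pyMin x t)).filter
          (fun num => decide (0 < num))) := by
  rw [cutBamboo]

theorem scanRuns_cons (v : Int) (rest : List Int) :
    scanRuns (v :: rest) =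
      ((rest.dropWhile (fun y => y == v)).length : Int) ::
        scanRuns (rest.dropWhile (fun y => y == v)) := by
  rw [scanRuns]

-- the running min commutes with a pointwise shift
theorem pyMin_map_add (t : List Int) (x c : Int) :
    pyMin (x + c) (t.map (fun y => y + c)) = pyMin x t + c := by
  induction t generalizing x with
  | nil => rfl
  | cons a t ih =>
    unfold pyMin at *
    rw [List.map_cons, List.foldl_cons, List.foldl_cons, min_add_add_right]
    exact ih (min x a)

-- A's result is invariant under a pointwise shift of the input
theorem cutBamboo_shift (l : List Int) (c : Int) :
    cutBamboo (l.map (fun y => y + c)) = cutBamboo l := by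
  cases l with
  | nil => rfl
  | cons x t =>
    rw [List.map_cons, cutBamboo_cons, cutBamboo_cons, pyMin_map_add]
    have htemp : ((x + c) :: t.map (fun y => y + c)).map (fun num => num - (pyMin x t + c)) =
        (x :: t).map (fun num => num - pyMin x t) := by
      simp only [List.map_cons, List.map_map]
      congr 1
      · ring
      · exact List.map_congr_left (fun y _ => by simp only [Function.comp_apply]; ring)
    rw [htemp]

-- subtract-then-keep-positive is filter-above-m, shifted
theorem temp_eq_filter_map (l : List Int) (m : Int) :
    (l.map (fun y => y - m)).filter (fun y => decide (0 < y)) =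
      (l.filter (fun y => decide (m < y))).map (fun y => y - m) := by
  induction l with
  | nil => rfl
  | cons a t ih =>
    simp only [List.map_cons, List.filter_cons, sub_pos]
    by_cases h : m < a
    · simp [h, ih]
    · simp [h, ih]

-- on a sorted list whose least value is v, skipping the run of v's is filtering (> v)
theorem dropWhile_eq_filter_gt (v : Int) (r : List Int)
    (hs : r.Pairwise (· ≤ ·)) (hv : ∀ y ∈ r, v ≤ y) :
    r.dropWhile (fun y => y == v) = r.filter (fun y => decide (v < y)) := by
  induction r with
  | nil => rfl
  | cons a t ih =>
    rw [List.pairwise_cons] at hs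
    by_cases h : a = v
    · subst h
      rw [List.dropWhile_cons_of_pos (by simp), List.filter_cons_of_neg (by simp),
        ih hs.2 (fun y hy => hv y (List.mem_cons_of_mem _ hy))]
    · have hva : v < a := lt_of_le_of_ne (hv a List.mem_cons_self) (Ne.symm h)
      rw [List.dropWhile_cons_of_neg (by simp [h]), List.filter_cons_of_pos (by simp [hva]),
        List.filter_eq_self.mpr (fun y hy => by
          have := hs.1 y hy; simp; omega)]

-- filtering commutes with sorting
theorem sorted_filter_comm (l : List Int) (p : Int → Bool) :
    (PySem.List.sorted l (fun x => x) false).filter p =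
      PySem.List.sorted (l.filter p) (fun x => x) false := by
  exact (PySem.List.sorted_id_eq_of_perm_of_pairwise (l.filter p)
    ((PySem.List.sorted l (fun x => x) false).filter p)
    ((PySem.List.sorted_perm l (fun x => x) false).filter p)
    ((PySem.List.sorted_pairwise l (fun x => x)).filter p)).symm

-- the head of the sorted list is the running min
theorem head_sorted_eq_pyMin (x : Int) (t : List Int) (v : Int) (rest : List Int)
    (h : PySem.List.sorted (x :: t) (fun x => x) false = v :: rest) :
    pyMin x t = v := by
  have hvle : ∀ y ∈ x :: t, v ≤ y := PySem.List.key_head_sorted_le (x :: t) (fun x => x) h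
  have hmem : pyMin x t ∈ x :: t := by
    rcases PySem.List.foldl_min_mem t x with h' | h'
    · rw [show pyMin x t = x from h']; exact List.mem_cons_self
    · exact List.mem_cons_of_mem _ h'
  have hvmem : v ∈ x :: t := by
    rw [← PySem.List.mem_sorted (x :: t) (fun x => x) false v, h]
    exact List.mem_cons_self
  have h1 : v ≤ pyMin x t := hvle _ hmem
  have h2 : pyMin x t ≤ v := by
    rcases PySem.List.foldl_min_le t x with ⟨hle, hall⟩
    rcases List.mem_cons.mp hvmem with h' | h'
    · unfold pyMin; omega
    · exact hall v h'
  omega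

-- main equivalence, by strong induction on the length
theorem main_eq : ∀ (n : Nat) (l : List Int), l.length ≤ n →
    cutBamboo l = scanRuns (PySem.List.sorted l (fun x => x) false) := by
  intro n
  induction n with
  | zero =>
    intro l hl
    have hnil : l = [] := List.eq_nil_of_length_eq_zero (Nat.le_zero.mp hl)
    subst hnil
    rw [cutBamboo_nil, PySem.List.sorted_eq_nil_iff _ _ _ |>.mpr rfl, scanRuns_nil]
  | succ n ih =>
    intro l hl
    cases hl' : l with
    | nil =>
      rw [cutBamboo_nil, PySem.List.sorted_eq_nil_iff _ _ _ |>.mpr rfl, scanRuns_nil]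
    | cons x t =>
      subst hl'
      cases hs : PySem.List.sorted (x :: t) (fun x => x) false with
      | nil => exact absurd ((PySem.List.sorted_eq_nil_iff _ _ _).mp hs) (by simp)
      | cons v rest =>
        have hm : pyMin x t = v := head_sorted_eq_pyMin x t v rest hs
        set f : List Int := (x :: t).filter (fun y => decide (v < y)) with hf
        have hflt : f.length < (x :: t).length := by
          rw [hf, List.length_filter_lt_length_iff_exists]
          refine ⟨v, ?_, by simp⟩
          rw [← hm]
          rcases PySem.List.foldl_min_mem t x with h' | h'
          · rw [show pyMin x t = x from h']; exact List.mem_cons_self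
          · exact List.mem_cons_of_mem _ h'
        -- A side
        rw [cutBamboo_cons, hm, temp_eq_filter_map, ← hf]
        have hshift : cutBamboo (f.map (fun y => y - v)) = cutBamboo f := by
          have he : (fun y : Int => y - v) = (fun y : Int => y + (-v)) := by
            funext y; ring
          rw [he, cutBamboo_shift]
        rw [hshift, List.length_map]
        -- B side
        rw [scanRuns_cons]
        have hpw : (v :: rest).Pairwise (· ≤ ·) := by
          rw [← hs]; exact PySem.List.sorted_pairwise _ _
        rw [List.pairwise_cons] at hpw
        have hdrop : rest.dropWhile (fun y => y == v) = rest.filter (fun y => decide (v < y)) :=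
          dropWhile_eq_filter_gt v rest hpw.2 hpw.1
        have hrest : rest.filter (fun y => decide (v < y)) =
            PySem.List.sorted f (fun x => x) false := by
          have hcons : rest.filter (fun y => decide (v < y)) =
              (v :: rest).filter (fun y => decide (v < y)) := by
            rw [List.filter_cons_of_neg (by simp)]
          rw [hcons, ← hs, sorted_filter_comm, hf]
        rw [hdrop, hrest]
        have hlen : (PySem.List.sorted f (fun x => x) false).length = f.length :=
          (PySem.List.sorted_perm f (fun x => x) false).length_eq
        rw [hlen, ← ih f (by simp only [List.length_cons] at hflt hl ⊢; omega)]

-- ===== VERDICT (by name: the statement is the Claim_ definition above) =====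
theorem cutBamboo_spec : Claim_equal_cutBamboo := by
  intro nums _
  exact main_eq nums.length nums le_rfl
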